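-- pv_equiv track=rewrite | github.com/ikokkari/Wordsquare | doublewordsquare.py | compute_order
-- ===== SOURCE A (Python) =====
-- def compute_order(n):
--     order, curr = [], 0
--     for s in range(0, 2*n):
--         for x in range(s+1):
--             y = s-x
--             if 0 <= x < n and 0 <= y < n:
--                 order.append((x, y))
--     return order
-- ===== SOURCE B (Python) =====
-- def compute_order(n):
--     return sorted(((x, y) for x in range(n) for y in range(n)),
--                   key=lambda p: p[0] + p[1])
-- ===== Notes on version B (the rewrite author's own statement) =====
-- stated objective: alternative
-- what changed: B generates the grid row-major with a flat comprehension and reorders it with one stable sort keyed on x+y, instead of A's diagonal sweep with a per-cell bounds check.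
import Mathlib
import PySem

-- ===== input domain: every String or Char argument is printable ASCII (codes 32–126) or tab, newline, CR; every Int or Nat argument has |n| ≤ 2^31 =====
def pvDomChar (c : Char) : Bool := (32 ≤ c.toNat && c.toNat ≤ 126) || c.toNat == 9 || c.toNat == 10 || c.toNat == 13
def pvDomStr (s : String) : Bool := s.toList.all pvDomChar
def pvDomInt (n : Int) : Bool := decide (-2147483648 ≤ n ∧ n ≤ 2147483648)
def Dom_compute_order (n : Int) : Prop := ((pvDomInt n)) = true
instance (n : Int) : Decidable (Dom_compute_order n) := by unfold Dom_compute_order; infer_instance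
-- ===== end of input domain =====

-- B builds the grid row-major with a flat comprehension and reorders it with one stable sort keyed on x+y, replacing A's diagonal sweep with per-cell bounds checks (alternative decomposition, not faster).

-- ===== PORT A =====
def compute_order (n : Int) : List (Int × Int) :=
  (PySem.List.pyRange 0 (2*n)).foldl (fun order s =>
    (PySem.List.pyRange 0 (s+1)).foldl (fun order x =>
      let y := s - x
      if 0 ≤ x ∧ x < n ∧ 0 ≤ y ∧ y < n then order ++ [(x, y)] else order)
      order) []

-- ===== PORT B =====
def compute_order_alt (n : Int) : List (Int × Int) :=
  PySem.List.sorted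
    ((PySem.List.pyRange 0 n).flatMap (fun x =>
      (PySem.List.pyRange 0 n).map (fun y => (x, y))))
    (fun p => p.1 + p.2)

-- ===== PRECONDITION & SPEC =====
def Spec_compute_order (n : Int) (out : List (Int × Int)) : Prop := out = compute_order_alt n
instance (n : Int) (out : List (Int × Int)) : Decidable (Spec_compute_order n out) := by unfold Spec_compute_order; infer_instance

-- ===== CLAIM (what is proved, stated in full; the proofs are below) =====
def Claim_equal_compute_order : Prop := ∀ (n : Int), Dom_compute_order n → Spec_compute_order n (compute_order n)

-- ===== LEMMAS AND PROOFS =====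
def pvB (a b : Int × Int) : Bool := decide (a.1 + a.2 < b.1 + b.2)

def pvCell (s x : Nat) : Int × Int := ((x : Int), (s : Int) - (x : Int))

def pvBlock (m r y s : Nat) : List (Int × Int) :=
  ((List.range (r+1)).filter (fun x =>
      decide ((x < r ∧ x ≤ s ∧ s < x + m) ∨ (x = r ∧ r ≤ s ∧ s < r + y)))).map (pvCell s)

def pvE (m r y : Nat) : List (Int × Int) :=
  (List.range (max (r + m - 1) (r + y))).flatMap (pvBlock m r y)

lemma filter_range_extend (p : Nat → Bool) {m1 m2 : Nat} (h : m1 ≤ m2)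
    (hp : ∀ x, m1 ≤ x → p x = false) :
    (List.range m2).filter p = (List.range m1).filter p := by
  obtain ⟨k, rfl⟩ := Nat.exists_eq_add_of_le h
  rw [List.range_add, List.filter_append]
  have hnil : ((List.range k).map (fun x => m1 + x)).filter p = [] := by
    rw [List.filter_eq_nil_iff]
    intro a ha
    simp only [List.mem_map, List.mem_range] at ha
    obtain ⟨x, _, rfl⟩ := ha
    simp [hp _ (Nat.le_add_right _ _)]
  simp [hnil]

lemma blockEq_ne {m r y s : Nat} (h : s ≠ r + y) :
    pvBlock m r (y+1) s = pvBlock m r y s := by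
  unfold pvBlock
  rw [List.filter_congr (q := fun x =>
      decide ((x < r ∧ x ≤ s ∧ s < x + m) ∨ (x = r ∧ r ≤ s ∧ s < r + y)))]
  intro x hx
  simp only [decide_eq_decide]
  omega

lemma blockEq_at {m r y : Nat} (hy : y < m) :
    pvBlock m r (y+1) (r+y) = pvBlock m r y (r+y) ++ [((r:Int), (y:Int))] := by
  unfold pvBlock
  rw [List.range_succ, List.filter_append, List.filter_append]
  rw [List.filter_congr (l := List.range r) (q := fun x =>
      decide ((x < r ∧ x ≤ r+y ∧ r+y < x + m) ∨ (x = r ∧ r ≤ r+y ∧ r+y < r + y)))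
    (by intro x hx; simp only [List.mem_range] at hx; simp only [decide_eq_decide]; omega)]
  have h2 : ([r] : List Nat).filter (fun x =>
      decide ((x < r ∧ x ≤ r+y ∧ r+y < x + m) ∨ (x = r ∧ r ≤ r+y ∧ r+y < r + (y+1)))) = [r] := by
    simp
  have h3 : ([r] : List Nat).filter (fun x =>
      decide ((x < r ∧ x ≤ r+y ∧ r+y < x + m) ∨ (x = r ∧ r ≤ r+y ∧ r+y < r + y))) = [] := by
    simp
  rw [h2, h3]
  rw [List.append_nil, List.map_append]
  simp only [List.map_cons, List.map_nil, pvCell]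
  have : ((r+y : Nat) : Int) - (r:Int) = (y:Int) := by push_cast; omega
  rw [this]

lemma mem_block_key {m r y s : Nat} {a : Int × Int} (h : a ∈ pvBlock m r y s) :
    a.1 + a.2 = (s : Int) := by
  simp only [pvBlock, List.mem_map] at h
  obtain ⟨x, hx, rfl⟩ := h
  simp [pvCell]

lemma mem_flat_key {m r y t : Nat} {a : Int × Int} (f : Nat → Nat)
    (h : a ∈ ((List.range t).map f).flatMap (pvBlock m r y)) :
    ∃ i < t, a.1 + a.2 = ((f i : Nat) : Int) := by
  simp only [List.mem_flatMap, List.mem_map, List.mem_range] at h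
  obtain ⟨s, ⟨i, hi, rfl⟩, hb⟩ := h
  exact ⟨i, hi, mem_block_key hb⟩

lemma insert_mid {α : Type} (before : α → α → Bool) (p : α) (ys zs : List α)
    (h1 : ∀ a ∈ ys, before p a = false)
    (h2 : ∀ b ∈ zs.head?, before p b = true) :
    PySem.List.insertBy before p (ys ++ zs) = ys ++ p :: zs := by
  induction ys with
  | nil =>
    cases zs with
    | nil => simp [PySem.List.insertBy]
    | cons z t => simp at h2; simp [PySem.List.insertBy, h2]
  | cons a t ih =>
    have ha := h1 a (by simp)
    simp only [List.cons_append, PySem.List.insertBy, ha]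
    simp [ih (fun x hx => h1 x (by simp [hx]))]

lemma step {m r y : Nat} (hr : r < m) (hy : y < m) :
    PySem.List.insertBy pvB ((r:Int), (y:Int)) (pvE m r y) = pvE m r (y+1) := by
  have key_lo : ∀ a ∈ (List.range (r+y+1)).flatMap (pvBlock m r y),
      pvB ((r:Int), (y:Int)) a = false := by
    intro a ha
    simp only [List.mem_flatMap, List.mem_range] at ha
    obtain ⟨s, hs, hb⟩ := ha
    have hk := mem_block_key hb
    simp only [pvB, decide_eq_false_iff_not, not_lt]
    push_cast at hk ⊢; omega
  by_cases hcase : y + 1 < m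
  · have hN : max (r + m - 1) (r + y) = r + m - 1 := by omega
    have hN' : max (r + m - 1) (r + (y+1)) = r + m - 1 := by omega
    have hrange : List.range (r + m - 1) =
        List.range (r+y+1) ++ (List.range (m-y-2)).map (fun x => (r+y+1) + x) := by
      rw [show r + m - 1 = (r + y + 1) + (m - y - 2) by omega, List.range_add]
    unfold pvE
    rw [hN, hN', hrange, List.flatMap_append, List.flatMap_append]
    -- suffix blocks are unchanged
    have hQ : ((List.range (m-y-2)).map (fun x => (r+y+1) + x)).flatMap (pvBlock m r (y+1)) =
        ((List.range (m-y-2)).map (fun x => (r+y+1) + x)).flatMap (pvBlock m r y) := by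
      apply List.flatMap_congr
      intro s hs
      simp only [List.mem_map, List.mem_range] at hs
      obtain ⟨i, hi, rfl⟩ := hs
      exact blockEq_ne (by omega)
    rw [hQ]
    -- prefix blocks gain exactly the new cell at the end
    have hP : (List.range (r+y+1)).flatMap (pvBlock m r (y+1)) =
        (List.range (r+y+1)).flatMap (pvBlock m r y) ++ [((r:Int), (y:Int))] := by
      rw [List.range_succ, List.flatMap_append, List.flatMap_append]
      rw [List.flatMap_congr (g := pvBlock m r y)
        (by intro s hs; simp only [List.mem_range] at hs; exact blockEq_ne (by omega))]
      simp only [List.flatMap_cons, List.flatMap_nil, List.append_nil]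
      rw [blockEq_at hy, List.append_assoc]
    rw [hP]
    rw [List.append_assoc]
    apply insert_mid
    · exact key_lo
    · intro b hb
      have hbm := List.mem_of_mem_head? hb
      obtain ⟨i, hi, hk⟩ := mem_flat_key _ hbm
      simp only [pvB, decide_eq_true_eq]
      push_cast at hk ⊢; omega
  · -- y = m - 1 : the new cell opens the last diagonal block, appended at the very end
    have hym : y + 1 = m := by omega
    have hN : max (r + m - 1) (r + y) = r + y := by omega
    have hN' : max (r + m - 1) (r + (y+1)) = r + y + 1 := by omega
    unfold pvE
    rw [hN, hN']
    have h1 : ∀ a ∈ (List.range (r+y)).flatMap (pvBlock m r y),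
        pvB ((r:Int), (y:Int)) a = false := by
      intro a ha
      apply key_lo
      simp only [List.mem_flatMap, List.mem_range] at ha ⊢
      obtain ⟨s, hs, hb⟩ := ha
      exact ⟨s, by omega, hb⟩
    have := insert_mid pvB ((r:Int), (y:Int)) ((List.range (r+y)).flatMap (pvBlock m r y)) []
      h1 (by intro b hb; simp at hb)
    rw [List.append_nil] at this
    rw [this]
    rw [List.range_succ, List.flatMap_append]
    rw [List.flatMap_congr (f := pvBlock m r (y+1)) (g := pvBlock m r y)
      (by intro s hs; simp only [List.mem_range] at hs; exact blockEq_ne (by omega))]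
    simp only [List.flatMap_cons, List.flatMap_nil, List.append_nil]
    rw [blockEq_at hy]
    have hempty : pvBlock m r y (r+y) = [] := by
      unfold pvBlock
      have : (List.range (r+1)).filter (fun x =>
          decide ((x < r ∧ x ≤ r+y ∧ r+y < x + m) ∨ (x = r ∧ r ≤ r+y ∧ r+y < r + y))) = [] := by
        rw [List.filter_eq_nil_iff]
        intro x hx
        simp only [List.mem_range] at hx
        simp only [decide_eq_true_eq]
        omega
      rw [this]; rfl
    rw [hempty]
    simp

def pvRowCell (r j : Nat) : Int × Int := ((r : Int), (j : Int))

lemma rowDone {m r : Nat} (hr : r < m) : pvE m r m = pvE m (r+1) 0 := by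
  unfold pvE
  rw [show max (r + m - 1) (r + m) = r + m by omega,
      show max (r + 1 + m - 1) (r + 1 + 0) = r + m by omega]
  apply List.flatMap_congr
  intro s hs
  unfold pvBlock
  rw [List.range_succ (n := r+1), List.filter_append]
  have h1 : ([r+1] : List Nat).filter (fun x =>
      decide ((x < r+1 ∧ x ≤ s ∧ s < x + m) ∨ (x = r+1 ∧ r+1 ≤ s ∧ s < r+1+0))) = [] := by
    simp
  rw [h1, List.append_nil]
  rw [List.filter_congr (l := List.range (r+1))
      (p := fun x => decide ((x < r+1 ∧ x ≤ s ∧ s < x + m) ∨ (x = r+1 ∧ r+1 ≤ s ∧ s < r+1+0)))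
      (q := fun x => decide ((x < r ∧ x ≤ s ∧ s < x + m) ∨ (x = r ∧ r ≤ s ∧ s < r + m)))
    (by intro x hx; simp only [List.mem_range] at hx; simp only [decide_eq_decide]; omega)]

lemma startE {m : Nat} : pvE m 0 0 = [] := by
  unfold pvE
  apply List.flatMap_eq_nil_iff.mpr
  intro s hs
  unfold pvBlock
  have : (List.range 1).filter (fun x =>
      decide ((x < 0 ∧ x ≤ s ∧ s < x + m) ∨ (x = 0 ∧ 0 ≤ s ∧ s < 0 + 0))) = [] := by
    simp
  rw [this]; rfl

lemma innerFold {m r : Nat} (hr : r < m) : ∀ k y, y + k = m →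
    List.foldl (fun acc p => PySem.List.insertBy pvB p acc) (pvE m r y)
      ((List.range' y k 1).map (pvRowCell r)) = pvE m r m := by
  intro k
  induction k with
  | zero => intro y hy; simp [show y = m by omega]
  | succ k ih =>
    intro y hy
    rw [List.range'_succ, List.map_cons, List.foldl_cons]
    rw [show PySem.List.insertBy pvB (pvRowCell r y) (pvE m r y) = pvE m r (y+1) from step hr (by omega)]
    exact ih (y+1) (by omega)

lemma outerFold {m : Nat} : ∀ j r, r + j = m →
    List.foldl (fun acc p => PySem.List.insertBy pvB p acc) (pvE m r 0)
      ((List.range' r j 1).flatMap (fun i => (List.range m).map (pvRowCell i)))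
      = pvE m m 0 := by
  intro j
  induction j with
  | zero => intro r hr; simp [show r = m by omega]
  | succ j ih =>
    intro r hr
    rw [List.range'_succ, List.flatMap_cons, List.foldl_append]
    have hrow : List.foldl (fun acc p => PySem.List.insertBy pvB p acc) (pvE m r 0)
        ((List.range m).map (pvRowCell r)) = pvE m (r+1) 0 := by
      rw [List.range_eq_range', innerFold (by omega) m 0 (by omega), rowDone (by omega)]
    rw [hrow]
    exact ih (r+1) (by omega)



lemma alt_eq (m : Nat) : compute_order_alt ((m : Nat) : Int) = pvE m m 0 := by
  unfold compute_order_alt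
  rw [PySem.List.pyRange_zero_natCast]
  simp only [List.flatMap_map, List.map_map]
  rw [PySem.List.sorted_eq_foldl_insertBy]
  have : List.foldl
      (fun acc x => PySem.List.insertBy (fun a b =>
        decide ((fun p : Int × Int => p.1 + p.2) a < (fun p : Int × Int => p.1 + p.2) b)) x acc) []
      ((List.range m).flatMap (fun i => (List.range m).map (fun j => (((i:Nat):Int), ((j:Nat):Int)))))
      = pvE m m 0 := by
    rw [show (fun a b : Int × Int =>
        decide ((fun p : Int × Int => p.1 + p.2) a < (fun p : Int × Int => p.1 + p.2) b)) = pvB from rfl]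
    have h2 : ((List.range m).flatMap (fun i => (List.range m).map (fun j => (((i:Nat):Int), ((j:Nat):Int)))))
        = (List.range' 0 m 1).flatMap (fun i => (List.range m).map (pvRowCell i)) := by
      rw [← List.range_eq_range']
      rfl
    rw [h2, ← startE (m := m)]
    exact outerFold m 0 (by omega)
  exact this

lemma blockA (m s : Nat) :
    ((PySem.List.pyRange 0 ((s:Int)+1)).filter (fun x =>
        decide (0 ≤ x ∧ x < (m:Int) ∧ 0 ≤ (s:Int) - x ∧ (s:Int) - x < (m:Int)))).map
      (fun x => (x, (s:Int) - x)) = pvBlock m m 0 s := by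
  have h1 : ((s:Int)+1) = (((s+1 : Nat)) : Int) := by push_cast; ring
  rw [h1, PySem.List.pyRange_zero_natCast, List.filter_map, List.map_map]
  unfold pvBlock
  simp only [Function.comp_def]
  have hK : ∀ K : Nat, s+1 ≤ K → m+1 ≤ K →
      (List.range (s+1)).filter (fun x : Nat =>
        decide (0 ≤ (x:Int) ∧ (x:Int) < (m:Int) ∧ 0 ≤ (s:Int) - x ∧ (s:Int) - x < (m:Int))) =
      (List.range (m+1)).filter (fun x =>
        decide ((x < m ∧ x ≤ s ∧ s < x + m) ∨ (x = m ∧ m ≤ s ∧ s < m + 0))) := by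
    intro K hK1 hK2
    rw [← filter_range_extend (m2 := K) _ hK1
        (by intro x hx; simp only [decide_eq_false_iff_not]; push_cast; omega),
        ← filter_range_extend (m2 := K) _ hK2
        (by intro x hx; simp only [decide_eq_false_iff_not]; omega)]
    apply List.filter_congr
    intro x hx
    simp only [decide_eq_decide]
    constructor
    · intro h; push_cast at h; omega
    · intro h; push_cast; omega
  rw [hK (max (s+1) (m+1)) (le_max_left _ _) (le_max_right _ _)]
  apply List.map_congr_left
  intro x hx
  simp [pvCell]

lemma a_eq (m : Nat) : compute_order ((m : Nat) : Int) = pvE m m 0 := by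
  unfold compute_order
  have h2m : (2 * ((m:Nat):Int)) = (((2*m : Nat)) : Int) := by push_cast; ring
  rw [h2m, PySem.List.pyRange_zero_natCast]
  have hinner : ∀ (order : List (Int × Int)) (s : Int),
      (PySem.List.pyRange 0 (s+1)).foldl (fun order x =>
        let y := s - x
        if 0 ≤ x ∧ x < ((m:Nat):Int) ∧ 0 ≤ y ∧ y < ((m:Nat):Int) then order ++ [(x, y)] else order)
        order
      = order ++ ((PySem.List.pyRange 0 (s+1)).filter (fun x =>
          decide (0 ≤ x ∧ x < ((m:Nat):Int) ∧ 0 ≤ s - x ∧ s - x < ((m:Nat):Int)))).map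
        (fun x => (x, s - x)) := by
    intro order s
    exact PySem.List.foldl_append_ite
      (fun x => 0 ≤ x ∧ x < ((m:Nat):Int) ∧ 0 ≤ s - x ∧ s - x < ((m:Nat):Int))
      (fun x => (x, s - x)) _ order
  trans List.foldl (fun (order : List (Int × Int)) (s : Int) =>
      order ++ ((PySem.List.pyRange 0 (s+1)).filter (fun x =>
        decide (0 ≤ x ∧ x < ((m:Nat):Int) ∧ 0 ≤ s - x ∧ s - x < ((m:Nat):Int)))).map
        (fun x => (x, s - x))) [] ((List.range (2*m)).map (fun k : Nat => ((k:Nat):Int)))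
  · apply PySem.List.foldl_congr_mem
    intro acc x _
    exact hinner acc x
  · rw [PySem.List.foldl_append_eq_flatMap, List.nil_append, List.flatMap_map]
    have hb : ∀ sN ∈ List.range (2*m),
        ((PySem.List.pyRange 0 (((sN:Nat):Int)+1)).filter (fun x =>
          decide (0 ≤ x ∧ x < ((m:Nat):Int) ∧ 0 ≤ ((sN:Nat):Int) - x ∧ ((sN:Nat):Int) - x < ((m:Nat):Int)))).map
          (fun x => (x, ((sN:Nat):Int) - x)) = pvBlock m m 0 sN := fun sN _ => blockA m sN
    rw [List.flatMap_congr hb]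
    unfold pvE
    rcases Nat.eq_zero_or_pos m with hm | hm
    · subst hm; rfl
    · rw [show (2*m) = (max (m + m - 1) m) + 1 by omega, List.range_succ,
          List.flatMap_append]
      have hlast : pvBlock m m 0 (max (m + m - 1) m) = [] := by
        unfold pvBlock
        have : (List.range (m+1)).filter (fun x =>
            decide ((x < m ∧ x ≤ max (m + m - 1) m ∧ max (m + m - 1) m < x + m)
              ∨ (x = m ∧ m ≤ max (m + m - 1) m ∧ max (m + m - 1) m < m + 0))) = [] := by
          rw [List.filter_eq_nil_iff]
          intro x hx
          simp only [List.mem_range] at hx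
          simp only [decide_eq_true_eq]
          omega
        rw [this]; rfl
      simp [hlast]

theorem ports_agree (n : Int) : compute_order n = compute_order_alt n := by
  by_cases hn : 0 < n
  · have hcast : n = ((n.toNat : Nat) : Int) := (Int.toNat_of_nonneg hn.le).symm
    rw [hcast, a_eq, alt_eq]
  · have h1 : PySem.List.pyRange 0 (2*n) = [] := by
      simp [PySem.List.pyRange]; omega
    have h2 : PySem.List.pyRange 0 n = [] := by
      simp [PySem.List.pyRange]; omega
    simp [compute_order, compute_order_alt, h1, h2, PySem.List.sorted_eq_nil_iff]

-- ===== VERDICT (by name: the statement is the Claim_ definition above) =====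
theorem compute_order_spec : Claim_equal_compute_order := by
  intro n _
  unfold Spec_compute_order
  exact ports_agree n
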